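-- pv_equiv track=rewrite | github.com/magnusbauer/RFDiffusion2_all_the_code | benchmark/sweep_hyperparam.py | split_string_with_parentheses
-- ===== SOURCE A (Python) =====
-- def split_string_with_parentheses(string, delimiter=None):
--     '''
--     Splits a string using on delimiter (or whitespace if delimiter is None),
--     ignoring delimiters in between pairs of parentheses.
--     '''
--     if delimiter is None:
--         is_delimiter = lambda x: x.isspace()
--     else:
--         is_delimiter = lambda x: x==delimiter
--     result = []
--     current_word = ''
--     paren_count = 0
--
--     for char in string:
--         if char == '(':
--             paren_count += 1
--         elif char == ')':
--             paren_count -= 1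
--
--         if is_delimiter(char) and paren_count == 0:
--             if current_word:
--                 result.append(current_word)
--             current_word = ''
--         else:
--             current_word += char
--
--     if current_word:
--         result.append(current_word)
--
--     return result
-- ===== SOURCE B (Python) =====
-- def split_string_with_parentheses(string, delimiter=None):
--     '''
--     Splits a string on delimiter (or whitespace if delimiter is None),
--     ignoring delimiters in between pairs of parentheses.
--     Two-phase: record the indices of top-level delimiters, then slice
--     the string between consecutive cut points, keeping non-empty pieces.
--     '''
--     if delimiter is None:
--         is_delimiter = lambda x: x.isspace()
--     else:
--         is_delimiter = lambda x: x == delimiter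
--     # pass 1: index table of top-level delimiter positions
--     cuts = []
--     depth = 0
--     for i, ch in enumerate(string):
--         if ch == '(':
--             depth += 1
--         elif ch == ')':
--             depth -= 1
--         if depth == 0 and is_delimiter(ch):
--             cuts.append(i)
--     # pass 2: slice between consecutive cuts
--     pieces = []
--     start = 0
--     for cut in cuts:
--         if start < cut:
--             pieces.append(string[start:cut])
--         start = cut + 1
--     if start < len(string):
--         pieces.append(string[start:])
--     return pieces
-- ===== Notes on version B (the rewrite author's own statement) =====
-- stated objective: alternative
-- what changed: Replaces A's single-pass word accumulator with a two-phase design: a first scan records the index of every top-level delimiter, a second pass slices the string between consecutive cut points, keeping non-empty slices.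
import Mathlib
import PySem

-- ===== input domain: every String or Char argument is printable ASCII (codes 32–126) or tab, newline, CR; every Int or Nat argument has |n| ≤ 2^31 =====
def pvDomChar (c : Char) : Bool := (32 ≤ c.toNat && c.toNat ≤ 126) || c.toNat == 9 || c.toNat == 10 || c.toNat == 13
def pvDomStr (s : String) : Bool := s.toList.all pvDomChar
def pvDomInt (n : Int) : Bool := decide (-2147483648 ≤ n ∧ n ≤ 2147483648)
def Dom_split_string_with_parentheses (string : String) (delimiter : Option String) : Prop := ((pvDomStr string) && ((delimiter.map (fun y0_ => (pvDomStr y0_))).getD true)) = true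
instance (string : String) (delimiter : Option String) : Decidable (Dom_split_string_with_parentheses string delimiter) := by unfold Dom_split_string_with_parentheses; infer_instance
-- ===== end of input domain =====

-- B replaces A's word-accumulator loop by a cut-index table plus a slicing pass (alternative decomposition, same cost).

-- shared helpers: the paren-depth update and the delimiter test (a char of the
-- string is a 1-char Python string, compared with the delimiter string)
def pvBump (depth : Int) (c : Char) : Int :=
  if c = '(' then depth + 1 else if c = ')' then depth - 1 else depth

def pvIsDelim (delimiter : Option String) (c : Char) : Bool :=
  match delimiter with
  | none => PySem.Chars.isspace c
  | some d => String.ofList [c] == d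

-- ===== PORT A =====
-- A's loop: state (result, current_word, paren_count); current_word kept as List Char
def pvLoopA (delimiter : Option String) : List Char → List String → List Char → Int → List String
  | [], result, cur, _ => if cur = [] then result else result ++ [String.ofList cur]
  | c :: rest, result, cur, depth =>
      let depth' := pvBump depth c
      if pvIsDelim delimiter c && depth' == 0 then
        pvLoopA delimiter rest (if cur = [] then result else result ++ [String.ofList cur]) [] depth'
      else
        pvLoopA delimiter rest result (cur ++ [c]) depth'

def split_string_with_parentheses (string : String) (delimiter : Option String) : List String :=
  pvLoopA delimiter string.toList [] [] 0

-- ===== PORT B =====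
-- pass 1: indices of top-level delimiters
def pvCuts (delimiter : Option String) : List Char → Nat → Int → List Nat
  | [], _, _ => []
  | c :: rest, i, depth =>
      let depth' := pvBump depth c
      if depth' == 0 && pvIsDelim delimiter c then i :: pvCuts delimiter rest (i + 1) depth'
      else pvCuts delimiter rest (i + 1) depth'

-- pass 2: string[start:cut] with 0 ≤ start ≤ cut ≤ len is exactly take/drop
def pvPieces (full : List Char) : List Nat → Nat → List String
  | [], start => if start < full.length then [String.ofList (full.drop start)] else []
  | cut :: cuts, start =>
      if start < cut then String.ofList ((full.drop start).take (cut - start)) :: pvPieces full cuts (cut + 1)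
      else pvPieces full cuts (cut + 1)

def split_string_with_parentheses_alt (string : String) (delimiter : Option String) : List String :=
  pvPieces string.toList (pvCuts delimiter string.toList 0 0) 0

-- ===== PRECONDITION & SPEC =====
def Spec_split_string_with_parentheses (string : String) (delimiter : Option String) (out : List String) : Prop := out = split_string_with_parentheses_alt string delimiter
instance (string : String) (delimiter : Option String) (out : List String) : Decidable (Spec_split_string_with_parentheses string delimiter out) := by unfold Spec_split_string_with_parentheses; infer_instance

-- ===== CLAIM (what is proved, stated in full; the proofs are below) =====
def Claim_equal_split_string_with_parentheses : Prop := ∀ (string : String) (delimiter : Option String), Dom_split_string_with_parentheses string delimiter → Spec_split_string_with_parentheses string delimiter (split_string_with_parentheses string delimiter)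

-- ===== LEMMAS AND PROOFS =====

-- loop invariant: if rest is the suffix of full starting at i and current_word is
-- exactly full[start:i], then A's loop from this state is result ++ B's pieces
theorem pvKey (delimiter : Option String) (full : List Char) :
    ∀ (rest : List Char) (i start : Nat) (cur : List Char) (result : List String) (depth : Int),
      full.drop i = rest → start ≤ i → cur = (full.drop start).take (i - start) →
      pvLoopA delimiter rest result cur depth =
        result ++ pvPieces full (pvCuts delimiter rest i depth) start := by
  intro rest
  induction rest with
  | nil =>
    intro i start cur result depth hdrop hle hcur
    have hlen : full.length ≤ i := List.drop_eq_nil_iff.mp hdrop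
    have hcur' : cur = full.drop start := by
      rw [hcur]
      exact List.take_of_length_le (by simp; omega)
    simp only [pvLoopA, pvCuts, pvPieces]
    rw [hcur']
    by_cases hs : start < full.length
    · have hne : full.drop start ≠ [] := by
        simp [List.drop_eq_nil_iff]; omega
      rw [if_neg hne, if_pos hs]
    · have he : full.drop start = [] := List.drop_eq_nil_iff.mpr (by omega)
      rw [if_pos he, if_neg hs]
      simp
  | cons c rest' ih =>
    intro i start cur result depth hdrop hle hcur
    have hi : i < full.length := by
      by_contra h
      rw [List.drop_eq_nil_iff.mpr (by omega)] at hdrop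
      simp at hdrop
    have hdrop' : full.drop (i + 1) = rest' := by
      have h1 : full.drop (i + 1) = (full.drop i).drop 1 := by
        rw [List.drop_drop]
      rw [h1, hdrop]; rfl
    have hget : full[i]? = some c := by
      have h0 : (full.drop i)[0]? = some c := by rw [hdrop]; rfl
      simpa using h0
    have hcurne : (cur = []) ↔ ¬ (start < i) := by
      constructor
      · intro h hlt
        rw [hcur] at h
        rcases List.take_eq_nil_iff.mp h with h1 | h1
        · omega
        · have := List.drop_eq_nil_iff.mp h1; omega
      · intro h
        have hsi : i = start := by omega
        rw [hcur, hsi]; simp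
    simp only [pvLoopA, pvCuts]
    by_cases hdz : (pvIsDelim delimiter c && (pvBump depth c == 0)) = true
    · have hdz' : (pvBump depth c == 0 && pvIsDelim delimiter c) = true := by
        rwa [Bool.and_comm]
      rw [if_pos hdz, if_pos hdz']
      rw [ih (i + 1) (i + 1) [] _ (pvBump depth c) hdrop' (le_refl _) (by simp)]
      simp only [pvPieces]
      by_cases hlt : start < i
      · have hc : ¬ (cur = []) := fun h => (hcurne.mp h) hlt
        rw [if_neg hc, if_pos hlt]
        rw [List.append_assoc, List.singleton_append, hcur]
      · rw [if_pos (hcurne.mpr hlt), if_neg hlt]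
    · have hdz' : ¬ ((pvBump depth c == 0 && pvIsDelim delimiter c) = true) := by
        rwa [Bool.and_comm]
      rw [if_neg hdz, if_neg hdz']
      refine ih (i + 1) start (cur ++ [c]) result (pvBump depth c) hdrop' (by omega) ?_
      have hstep : (full.drop start).take (i - start + 1)
          = (full.drop start).take (i - start) ++ [c] := by
        rw [List.take_add_one]
        have hg : (full.drop start)[i - start]? = some c := by
          rw [List.getElem?_drop]
          have he : start + (i - start) = i := by omega
          rw [he, hget]
        rw [hg]; rfl
      rw [hcur, ← hstep]
      congr 1
      omega

-- ===== VERDICT (by name: the statement is the Claim_ definition above) =====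
theorem split_string_with_parentheses_spec : Claim_equal_split_string_with_parentheses := by
  intro string delimiter _
  unfold Spec_split_string_with_parentheses split_string_with_parentheses split_string_with_parentheses_alt
  rw [pvKey delimiter string.toList string.toList 0 0 [] [] 0 rfl (le_refl _) (by simp)]
  rfl
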